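-- pv_equiv track=rewrite | github.com/jthorvaldur/policy-orchestrator | scripts/ingest_sessions.py | _extract_project_and_repo
-- ===== SOURCE A (Python) =====
-- def _extract_project_and_repo(project_dir: str) -> tuple[str, str]:
--     """Extract repo name from project directory name."""
--     # Format: -Users-jthor-GitHub-div-legal or -Users-jthor-projects-ts-embed
--     project = project_dir
--     repo = project_dir
--
--     # Try to extract the last meaningful segment
--     parts = project_dir.split("-")
--
--     # Find the segment after known path components
--     path_markers = {"Users", "jthor", "GitHub", "projects", "phantom", "websites"}
--     meaningful = []
--     skip = True
--     for part in parts: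
--         if part in path_markers:
--             skip = True
--             meaningful = []
--             continue
--         if skip and part:
--             skip = False
--         if not skip:
--             meaningful.append(part)
--
--     if meaningful:
--         repo = "-".join(meaningful)
--
--     return project, repo
-- ===== SOURCE B (Python) =====
-- def _extract_project_and_repo(project_dir: str) -> tuple[str, str]:
--     """Extract repo name from project directory name."""
--     parts = project_dir.split("-")
--     path_markers = {"Users", "jthor", "GitHub", "projects", "phantom", "websites"}
--     # Collect the segments after the LAST marker by walking backwards until a marker.
--     tail = []
--     for part in reversed(parts):
--         if part in path_markers:
--             break
--         tail.append(part)
--     tail.reverse()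
--     # Drop leading empty segments (consecutive dashes right after the marker).
--     i = 0
--     while i < len(tail) and tail[i] == "":
--         i += 1
--     tail = tail[i:]
--     repo = "-".join(tail) if tail else project_dir
--     return project_dir, repo
-- ===== Notes on version B (the rewrite author's own statement) =====
-- stated objective: simpler
-- what changed: Replaces A's forward state machine (skip flag plus a meaningful list that is reset at every marker) by a single backward walk that stops at the last marker, then strips leading empty segments and joins.
import Mathlib
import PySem

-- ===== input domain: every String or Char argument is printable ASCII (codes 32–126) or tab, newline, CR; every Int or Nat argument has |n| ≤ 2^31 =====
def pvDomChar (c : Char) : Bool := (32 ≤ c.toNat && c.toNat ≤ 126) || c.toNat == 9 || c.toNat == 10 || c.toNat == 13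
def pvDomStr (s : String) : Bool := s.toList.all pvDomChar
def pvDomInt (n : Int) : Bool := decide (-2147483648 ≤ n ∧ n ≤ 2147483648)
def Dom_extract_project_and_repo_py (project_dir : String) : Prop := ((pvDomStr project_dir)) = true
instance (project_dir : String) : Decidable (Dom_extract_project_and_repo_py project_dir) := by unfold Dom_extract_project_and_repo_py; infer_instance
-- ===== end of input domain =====

-- B replaces A's forward skip/reset state machine by a backward walk to the last
-- marker plus a leading-empty strip; objective: simpler. (No side effects.)

-- ===== PORT A =====
-- path_markers = {"Users", "jthor", "GitHub", "projects", "phantom", "websites"}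
def pvMarkers : PySem.Set String :=
  PySem.Set.ofList ["Users", "jthor", "GitHub", "projects", "phantom", "websites"]

-- one iteration of A's for-loop over (skip, meaningful)
def pvStepA (s : Bool × List String) (part : String) : Bool × List String :=
  if part ∈ pvMarkers then (true, [])
  else
    let skip := if s.1 = true ∧ part ≠ "" then false else s.1
    if skip = false then (skip, s.2 ++ [part]) else (skip, s.2)

def extract_project_and_repo_py (project_dir : String) : String × String :=
  let project := project_dir
  let repo := project_dir
  let parts := (PySem.Str.split? project_dir "-").getD []
  let res := parts.foldl pvStepA (true, [])
  let meaningful := res.2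
  let repo := if meaningful ≠ [] then PySem.Str.join "-" meaningful else repo
  (project, repo)

-- ===== PORT B =====
-- B's backward for-loop with break: collect parts (in reversed order) until a marker
def pvCollectB : List String → List String
  | [] => []
  | p :: rest => if p ∈ pvMarkers then [] else p :: pvCollectB rest

-- B's leading-empty strip (the index-advancing while loop)
def pvStripB : List String → List String
  | [] => []
  | p :: rest => if p = "" then pvStripB rest else p :: rest

def extract_project_and_repo_py_alt (project_dir : String) : String × String :=
  let parts := (PySem.Str.split? project_dir "-").getD []
  let tail := (pvCollectB parts.reverse).reverse
  let tail := pvStripB tail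
  let repo := if tail ≠ [] then PySem.Str.join "-" tail else project_dir
  (project_dir, repo)

-- ===== PRECONDITION & SPEC =====
def Spec_extract_project_and_repo_py (project_dir : String) (out : String × String) : Prop := out = extract_project_and_repo_py_alt project_dir
instance (project_dir : String) (out : String × String) : Decidable (Spec_extract_project_and_repo_py project_dir out) := by unfold Spec_extract_project_and_repo_py; infer_instance

-- ===== CLAIM (what is proved, stated in full; the proofs are below) =====
def Claim_equal_extract_project_and_repo_py : Prop := ∀ (project_dir : String), Dom_extract_project_and_repo_py project_dir → Spec_extract_project_and_repo_py project_dir (extract_project_and_repo_py project_dir)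

-- ===== LEMMAS AND PROOFS =====

-- B's "tail after the last marker, leading empties stripped", as one function of parts
def pvM (parts : List String) : List String :=
  pvStripB (pvCollectB parts.reverse).reverse

theorem pvStripB_append (l : List String) (p : String) :
    pvStripB (l ++ [p]) =
      if pvStripB l = [] then (if p = "" then [] else [p]) else pvStripB l ++ [p] := by
  induction l with
  | nil => simp [pvStripB]
  | cons q rest ih =>
    by_cases hq : q = "" <;> simp [pvStripB, hq, ih]

-- A's loop state after processing `parts` is exactly (pvM parts is empty, pvM parts)
theorem pvMain (parts : List String) :
    parts.foldl pvStepA (true, []) = ((pvM parts).isEmpty, pvM parts) := by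
  induction parts using List.reverseRecOn with
  | nil => rfl
  | append_singleton parts p ih =>
    rw [List.foldl_append, ih]
    unfold pvM
    rw [List.reverse_append]
    by_cases hm : p ∈ pvMarkers
    · simp [pvCollectB, hm, pvStepA, pvStripB]
    · have hc : pvCollectB (p :: parts.reverse) = p :: pvCollectB parts.reverse := by
        simp [pvCollectB, hm]
      rw [List.reverse_singleton, List.singleton_append, hc, List.reverse_cons, pvStripB_append]
      by_cases he : pvStripB (pvCollectB parts.reverse).reverse = [] <;>
        by_cases hp : p = "" <;>
          simp_all [pvStepA, List.isEmpty_iff] <;>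
            cases h' : pvStripB (pvCollectB parts.reverse).reverse <;> simp_all

-- ===== VERDICT (by name: the statement is the Claim_ definition above) =====
theorem extract_project_and_repo_py_spec : Claim_equal_extract_project_and_repo_py := by
  intro s _
  show extract_project_and_repo_py s = extract_project_and_repo_py_alt s
  unfold extract_project_and_repo_py extract_project_and_repo_py_alt
  simp only [pvMain ((PySem.Str.split? s "-").getD [])]
  rfl
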